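-- pv_equiv track=rewrite | github.com/komi786/cde_mapper | src/rag/utils.py | extract_visit_number
-- ===== SOURCE A (Python) =====
-- def extract_visit_number(visits_string):
--     num_str = ""
--     for char in visits_string:
--         if char.isdigit():
--             num_str += char
--         elif (
--             num_str
--         ):  # Break as soon as we encounter the first non-digit after a number
--             break
--     return int(num_str) if num_str else None
-- ===== SOURCE B (Python) =====
-- def extract_visit_number(visits_string):
--     normalized = "".join(c if c.isdigit() else " " for c in visits_string)
--     runs = normalized.split()
--     return int(runs[0]) if runs else None
-- ===== Notes on version B (the rewrite author's own statement) =====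
-- stated objective: alternative
-- what changed: Replaced A's single stateful scan with a break flag by a normalize-then-tokenize strategy: map every non-digit character to a space, tokenize the whole string with str.split() into all digit runs, and take the first token.
import Mathlib
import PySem

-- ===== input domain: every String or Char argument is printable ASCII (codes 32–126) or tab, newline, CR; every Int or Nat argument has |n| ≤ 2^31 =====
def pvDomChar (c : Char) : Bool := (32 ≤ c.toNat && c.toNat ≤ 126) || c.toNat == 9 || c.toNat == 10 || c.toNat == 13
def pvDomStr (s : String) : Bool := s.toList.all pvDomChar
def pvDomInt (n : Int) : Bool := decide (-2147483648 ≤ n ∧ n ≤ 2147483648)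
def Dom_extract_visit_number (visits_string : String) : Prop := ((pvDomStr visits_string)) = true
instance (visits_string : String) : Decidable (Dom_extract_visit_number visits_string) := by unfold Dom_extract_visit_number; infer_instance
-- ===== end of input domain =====

-- B replaces A's stateful break-flag scan by normalize-then-tokenize: map every non-digit to a
-- space, split() the whole string into all digit runs, and int() the first (objective: alternative).


-- ===== PORT A =====
-- A's for-loop: accumulate digits into num_str; break on first non-digit after a digit run.
def pvLoopA : List Char → List Char → List Char
  | acc, [] => acc
  | acc, c :: cs =>
    if PySem.Chars.isdigit c then pvLoopA (acc ++ [c]) cs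
    else if acc ≠ [] then acc
    else pvLoopA acc cs

def extract_visit_number (visits_string : String) : Option Int :=
  let num_str := pvLoopA [] visits_string.toList
  if num_str = [] then none else PySem.Int.ofChars? num_str

-- ===== PORT B =====
-- B: map every non-digit to ' ', split() into the digit runs, int() the first run if any.
def extract_visit_number_alt (visits_string : String) : Option Int :=
  let normalized := visits_string.toList.map
    (fun c => if PySem.Chars.isdigit c then c else ' ')
  let runs := PySem.Chars.split₀ normalized
  match runs with
  | [] => none
  | r :: _ => PySem.Int.ofChars? r

-- ===== PRECONDITION & SPEC =====
def Spec_extract_visit_number (visits_string : String) (out : Option Int) : Prop := out = extract_visit_number_alt visits_string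
instance (visits_string : String) (out : Option Int) : Decidable (Spec_extract_visit_number visits_string out) := by unfold Spec_extract_visit_number; infer_instance

-- ===== CLAIM (what is proved, stated in full; the proofs are below) =====
def Claim_equal_extract_visit_number : Prop := ∀ (visits_string : String), Dom_extract_visit_number visits_string → Spec_extract_visit_number visits_string (extract_visit_number visits_string)

-- ===== LEMMAS AND PROOFS =====
-- B's normalization map, named for the proofs
def pvNormChar (c : Char) : Char := if PySem.Chars.isdigit c then c else ' '

theorem pvDigit_not_space {c : Char} (h : PySem.Chars.isdigit c = true) :
    PySem.Chars.isspace c = false := by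
  simp [PySem.Chars.isdigit, Char.le_def] at h
  have g1 : 48 ≤ c.toNat := by
    have e : (48 : UInt32).toNat = 48 := rfl
    exact e ▸ UInt32.le_iff_toNat_le.mp h.1
  have g2 : c.toNat ≤ 57 := by
    have e : (57 : UInt32).toNat = 57 := rfl
    exact e ▸ UInt32.le_iff_toNat_le.mp h.2
  simp only [PySem.Chars.isspace, Bool.or_eq_false_iff, Bool.and_eq_false_iff,
    decide_eq_false_iff_not]
  omega

theorem pvNorm_digit {c : Char} (h : PySem.Chars.isdigit c = true) :
    pvNormChar c = c := by simp [pvNormChar, h]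

-- A's loop once a digit has been collected: it takes the remaining digit run.
theorem pvLoopA_ne (cs : List Char) (acc : List Char) (h : acc ≠ []) :
    pvLoopA acc cs = acc ++ cs.takeWhile PySem.Chars.isdigit := by
  induction cs generalizing acc with
  | nil => simp [pvLoopA]
  | cons c cs ih =>
    by_cases hd : PySem.Chars.isdigit c
    · simp [pvLoopA, hd, List.takeWhile, ih (acc ++ [c]) (by simp)]
    · simp [pvLoopA, hd, h, List.takeWhile]

-- A's loop from the empty accumulator: first digit run after the non-digit prefix.
theorem pvLoopA_nil (cs : List Char) :
    pvLoopA [] cs =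
      (cs.dropWhile (fun c => !PySem.Chars.isdigit c)).takeWhile PySem.Chars.isdigit := by
  induction cs with
  | nil => simp [pvLoopA]
  | cons c cs ih =>
    by_cases hd : PySem.Chars.isdigit c
    · simp [pvLoopA, hd, List.dropWhile, pvLoopA_ne cs [c] (by simp)]
    · simp [pvLoopA, hd, List.dropWhile, ih]

-- split₀.go accumulator law: finished tokens in acc are prepended (reversed).
theorem pvGo_acc (l : List Char) (cur : List Char) (acc : List (List Char)) :
    PySem.Chars.split₀.go l cur acc = acc.reverse ++ PySem.Chars.split₀.go l cur [] := by
  induction l generalizing cur acc with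
  | nil =>
    rw [PySem.Chars.split₀.go]
    conv_rhs => rw [PySem.Chars.split₀.go]
    by_cases h : cur.isEmpty = true <;> simp [h]
  | cons c l ih =>
    rw [PySem.Chars.split₀.go]
    conv_rhs => rw [PySem.Chars.split₀.go]
    by_cases hs : PySem.Chars.isspace c = true
    · rw [if_pos hs, if_pos hs]
      by_cases h : cur.isEmpty = true
      · rw [if_pos h, if_pos h]; exact ih [] acc
      · rw [if_neg h, if_neg h, ih [] (cur.reverse :: acc), ih [] [cur.reverse]]
        simp
    · rw [if_neg hs, if_neg hs]; exact ih (c :: cur) acc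

-- take phase: with a nonempty current token, the first emitted token is
-- cur.reverse ++ the leading digit run of the (normalized) rest.
theorem pvGo_take (cs : List Char) (cur : List Char) (h : cur ≠ []) :
    ∃ rest, PySem.Chars.split₀.go (cs.map pvNormChar) cur [] =
      (cur.reverse ++ cs.takeWhile PySem.Chars.isdigit) :: rest := by
  induction cs generalizing cur with
  | nil =>
    refine ⟨[], ?_⟩
    simp only [List.map_nil]
    rw [PySem.Chars.split₀.go]
    simp [List.isEmpty_iff, h]
  | cons c cs ih =>
    by_cases hd : PySem.Chars.isdigit c = true
    · obtain ⟨rest, hr⟩ := ih (c :: cur) (by simp)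
      refine ⟨rest, ?_⟩
      rw [List.map_cons, pvNorm_digit hd, PySem.Chars.split₀.go,
        if_neg (by simp [pvDigit_not_space hd]), hr]
      simp [List.takeWhile, hd]
    · have hn : pvNormChar c = ' ' := by simp [pvNormChar, hd]
      refine ⟨PySem.Chars.split₀.go (cs.map pvNormChar) [] [], ?_⟩
      rw [List.map_cons, hn, PySem.Chars.split₀.go,
        if_pos (by decide), if_neg (by simp [List.isEmpty_iff, h]), pvGo_acc]
      simp [List.takeWhile, hd]

-- skip phase: non-digits normalize to spaces and are skipped while no token is open.
theorem pvGo_skip (cs : List Char) (acc : List (List Char)) :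
    PySem.Chars.split₀.go (cs.map pvNormChar) [] acc =
      PySem.Chars.split₀.go
        ((cs.dropWhile (fun c => !PySem.Chars.isdigit c)).map pvNormChar) [] acc := by
  induction cs with
  | nil => simp
  | cons c cs ih =>
    by_cases hd : PySem.Chars.isdigit c = true
    · simp [List.dropWhile, hd]
    · have hn : pvNormChar c = ' ' := by simp [pvNormChar, hd]
      rw [List.map_cons, hn, PySem.Chars.split₀.go,
        if_pos (by decide), if_pos (by decide), List.dropWhile]
      simpa [hd] using ih

-- head of dropWhile (not digit) is a digit
theorem pvDrop_head (cs : List Char) (d : Char) (ds : List Char)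
    (h : cs.dropWhile (fun c => !PySem.Chars.isdigit c) = d :: ds) :
    PySem.Chars.isdigit d = true := by
  induction cs with
  | nil => simp at h
  | cons c cs ih =>
    by_cases hd : PySem.Chars.isdigit c = true
    · rw [List.dropWhile_cons_of_neg (by simp [hd])] at h
      cases h; exact hd
    · rw [List.dropWhile_cons_of_pos (by simp [hd])] at h
      exact ih h

-- no digit anywhere: B's split is empty
theorem pvSplit_nil (cs : List Char)
    (h : cs.dropWhile (fun c => !PySem.Chars.isdigit c) = []) :
    PySem.Chars.split₀ (cs.map pvNormChar) = [] := by
  unfold PySem.Chars.split₀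
  rw [pvGo_skip, h]
  simp only [List.map_nil]
  rw [PySem.Chars.split₀.go]
  simp

-- some digit: B's first token is exactly the first digit run
theorem pvSplit_cons (cs : List Char) (d : Char) (ds : List Char)
    (h : cs.dropWhile (fun c => !PySem.Chars.isdigit c) = d :: ds) :
    ∃ rest, PySem.Chars.split₀ (cs.map pvNormChar) =
      (d :: ds.takeWhile PySem.Chars.isdigit) :: rest := by
  have hd := pvDrop_head cs d ds h
  unfold PySem.Chars.split₀
  rw [pvGo_skip, h, List.map_cons, pvNorm_digit hd, PySem.Chars.split₀.go,
    if_neg (by simp [pvDigit_not_space hd])]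
  obtain ⟨rest, hr⟩ := pvGo_take ds [d] (by simp)
  exact ⟨rest, by rw [hr]; simp⟩

-- ===== VERDICT (by name: the statement is the Claim_ definition above) =====
theorem extract_visit_number_spec : Claim_equal_extract_visit_number := by
  intro s _
  unfold Spec_extract_visit_number extract_visit_number extract_visit_number_alt
  simp only [pvLoopA_nil]
  rw [show (s.toList.map fun c => if PySem.Chars.isdigit c then c else ' ')
        = s.toList.map pvNormChar from rfl]
  cases hds : s.toList.dropWhile (fun c => !PySem.Chars.isdigit c) with
  | nil => rw [pvSplit_nil s.toList hds]; simp
  | cons d ds =>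
    obtain ⟨rest, hr⟩ := pvSplit_cons s.toList d ds hds
    rw [hr]
    simp [List.takeWhile, pvDrop_head s.toList d ds hds]
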